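-- pv_equiv track=rewrite | github.com/kanchansingh0/GG-hackathon- | src/data_processing/feature_extractor.py | _analyze_operations
-- ===== SOURCE A (Python) =====
-- from typing import Dict, List
--
-- def _analyze_operations(signal_info: Dict) -> Dict:
--     """Analyze operation complexity"""
--     features = {
--         'has_arithmetic': 0,
--         'has_logical': 0,
--         'operation_count': 0
--     }
--
--     if 'operations' in signal_info:
--         ops = signal_info['operations']
--         features['has_arithmetic'] = int(any(op in ops for op in ['+', '-', '*', '/']))
--         features['has_logical'] = int(any(op in ops for op in ['&', '|', '^']))
--         features['operation_count'] = len(ops)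
--
--     return features
-- ===== SOURCE B (Python) =====
-- def _analyze_operations(signal_info):
--     """Analyze operation complexity (single pass over ops with two flags)."""
--     if 'operations' not in signal_info:
--         return {'has_arithmetic': 0, 'has_logical': 0, 'operation_count': 0}
--     ops = signal_info['operations']
--     has_arith = False
--     has_logic = False
--     for op in ops:
--         if op == '+' or op == '-' or op == '*' or op == '/':
--             has_arith = True
--         elif op == '&' or op == '|' or op == '^':
--             has_logic = True
--     return {
--         'has_arithmetic': int(has_arith),
--         'has_logical': int(has_logic),
--         'operation_count': len(ops),
--     }
-- ===== Notes on version B (the rewrite author's own statement) =====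
-- stated objective: alternative
-- what changed: Replaces the two fixed-probe any(...) scans over ops by one data-driven pass over ops maintaining two boolean flags, and builds the result dict directly instead of mutating a pre-filled one.
import Mathlib
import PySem

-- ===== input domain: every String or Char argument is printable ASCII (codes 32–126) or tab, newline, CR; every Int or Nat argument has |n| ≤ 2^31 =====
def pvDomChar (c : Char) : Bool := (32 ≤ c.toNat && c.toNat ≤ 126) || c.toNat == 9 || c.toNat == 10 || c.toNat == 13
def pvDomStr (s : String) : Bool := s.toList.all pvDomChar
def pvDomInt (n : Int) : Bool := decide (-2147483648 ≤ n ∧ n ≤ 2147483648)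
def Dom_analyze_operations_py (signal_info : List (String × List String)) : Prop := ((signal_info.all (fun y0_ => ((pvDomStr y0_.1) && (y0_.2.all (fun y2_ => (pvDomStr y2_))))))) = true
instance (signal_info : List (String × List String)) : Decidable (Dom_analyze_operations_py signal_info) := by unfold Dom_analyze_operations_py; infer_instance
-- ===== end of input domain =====

-- B replaces A's two fixed-probe any(...) scans with one pass over ops keeping two flags; alternative decomposition, same cost.

-- ===== PORT A =====
def analyze_operations_py (signal_info : List (String × List String)) : List (String × Int) :=
  let features : PySem.Dict String Int :=
    ((PySem.Dict.empty.insert "has_arithmetic" 0).insert "has_logical" 0).insert "operation_count" 0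
  let features :=
    match (PySem.Dict.mk signal_info).get? "operations" with
    | none => features
    | some ops =>
      let f1 := features.insert "has_arithmetic"
        (if ["+", "-", "*", "/"].any (fun op => ops.contains op) then (1 : Int) else 0)
      let f2 := f1.insert "has_logical"
        (if ["&", "|", "^"].any (fun op => ops.contains op) then (1 : Int) else 0)
      f2.insert "operation_count" (ops.length : Int)
  features.items

-- ===== PORT B =====
def pvStepB (st : Bool × Bool) (op : String) : Bool × Bool :=
  if op == "+" || op == "-" || op == "*" || op == "/" then (true, st.2)
  else if op == "&" || op == "|" || op == "^" then (st.1, true)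
  else st

def analyze_operations_py_alt (signal_info : List (String × List String)) : List (String × Int) :=
  match (PySem.Dict.mk signal_info).get? "operations" with
  | none => [("has_arithmetic", 0), ("has_logical", 0), ("operation_count", 0)]
  | some ops =>
    let flags := ops.foldl pvStepB (false, false)
    [("has_arithmetic", if flags.1 then (1 : Int) else 0),
     ("has_logical", if flags.2 then (1 : Int) else 0),
     ("operation_count", (ops.length : Int))]

-- ===== PRECONDITION & SPEC =====
def Spec_analyze_operations_py (signal_info : List (String × List String)) (out : List (String × Int)) : Prop := out = analyze_operations_py_alt signal_info
instance (signal_info : List (String × List String)) (out : List (String × Int)) : Decidable (Spec_analyze_operations_py signal_info out) := by unfold Spec_analyze_operations_py; infer_instance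

-- ===== CLAIM (what is proved, stated in full; the proofs are below) =====
def Claim_equal_analyze_operations_py : Prop := ∀ (signal_info : List (String × List String)), Dom_analyze_operations_py signal_info → Spec_analyze_operations_py signal_info (analyze_operations_py signal_info)

-- ===== LEMMAS AND PROOFS =====

-- B's fold computes, in one pass, exactly the two membership flags A probes for.
lemma foldB_eq (ops : List String) (a b : Bool) :
    ops.foldl pvStepB (a, b) =
      (a || ops.any (fun op => op == "+" || op == "-" || op == "*" || op == "/"),
       b || ops.any (fun op => op == "&" || op == "|" || op == "^")) := by
  induction ops generalizing a b with
  | nil => simp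
  | cons x xs ih =>
    simp only [List.foldl_cons, List.any_cons, pvStepB]
    by_cases h1 : (x == "+" || x == "-" || x == "*" || x == "/") = true
    · have h2 : (x == "&" || x == "|" || x == "^") = false := by
        simp only [Bool.or_eq_true, beq_iff_eq] at h1
        rcases h1 with ((h | h) | h) | h <;> subst h <;> rfl
      simp [h1, h2, ih]
    · simp only [Bool.not_eq_true] at h1
      by_cases h2 : (x == "&" || x == "|" || x == "^") = true
      · simp [h1, h2, ih]
      · simp only [Bool.not_eq_true] at h2
        simp [h1, h2, ih]

-- A's probe-list scan equals B's element-wise scan.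
lemma probe_arith (ops : List String) :
    (["+", "-", "*", "/"].any (fun op => ops.contains op)) =
      ops.any (fun op => op == "+" || op == "-" || op == "*" || op == "/") := by
  rw [Bool.eq_iff_iff]
  simp only [List.any_cons, List.any_nil, Bool.or_eq_true, List.any_eq_true, beq_iff_eq,
    List.contains_iff_mem, Bool.false_eq_true, or_false]
  constructor
  · rintro (h | h | h | h) <;> exact ⟨_, h, by simp⟩
  · rintro ⟨x, hx, ((h | h) | h) | h⟩ <;> subst h <;> tauto

lemma probe_logic (ops : List String) :
    (["&", "|", "^"].any (fun op => ops.contains op)) =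
      ops.any (fun op => op == "&" || op == "|" || op == "^") := by
  rw [Bool.eq_iff_iff]
  simp only [List.any_cons, List.any_nil, Bool.or_eq_true, List.any_eq_true, beq_iff_eq,
    List.contains_iff_mem, Bool.false_eq_true, or_false]
  constructor
  · rintro (h | h | h) <;> exact ⟨_, h, by simp⟩
  · rintro ⟨x, hx, (h | h) | h⟩ <;> subst h <;> tauto

-- ===== VERDICT (by name: the statement is the Claim_ definition above) =====
theorem analyze_operations_py_spec : Claim_equal_analyze_operations_py := by
  intro signal_info _
  unfold Spec_analyze_operations_py analyze_operations_py analyze_operations_py_alt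
  cases h : (PySem.Dict.mk signal_info).get? "operations" with
  | none => rfl
  | some ops =>
    simp only [foldB_eq, ← probe_arith, ← probe_logic, Bool.false_or]
    rfl
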